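-- pv_equiv track=rewrite | github.com/SilasNight/Regex-Practice | main.py | format_numbers
-- ===== SOURCE A (Python) =====
-- def standardize_numbers(number_input):
--     num = list("0123456789")
--     formated_number = ""
--     for char in number_input:
--         if char in num:
--             if len(formated_number) == 3 or  len(formated_number) == 7:
--                 formated_number += "-"
--             formated_number += char
--     return formated_number
--
-- def format_numbers(text_list):
--     formated_list = []
--     formated_string = ""
--     for number in text_list:
--         formated_list.append(standardize_numbers(number))
--     num = len(formated_list)-1
--     for index,number in enumerate(formated_list):
--         if index == 0:
--             formated_string += number
--         elif num == index:
--             formated_string += f" or {number}"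
--         else:
--             formated_string += f", {number}"
--     return formated_string
-- ===== SOURCE B (Python) =====
-- def standardize_numbers(number_input):
--     digits = ''.join(c for c in number_input if c in '0123456789')
--     if len(digits) <= 3:
--         return digits
--     if len(digits) <= 6:
--         return digits[:3] + '-' + digits[3:]
--     return digits[:3] + '-' + digits[3:6] + '-' + digits[6:]
--
-- def format_numbers(text_list):
--     parts = [standardize_numbers(n) for n in text_list]
--     if not parts:
--         return ''
--     if len(parts) == 1:
--         return parts[0]
--     return ', '.join(parts[:-1]) + ' or ' + parts[-1]
-- ===== Notes on version B (the rewrite author's own statement) =====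
-- stated objective: simpler
-- what changed: B replaces A's char-by-char accumulator with state-dependent dash insertion by collect-then-slice formatting (filter the digits, then slice them into 3/3/rest groups), and replaces A's enumerate/index-based string concatenation by list slicing with str.join.
import Mathlib
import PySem

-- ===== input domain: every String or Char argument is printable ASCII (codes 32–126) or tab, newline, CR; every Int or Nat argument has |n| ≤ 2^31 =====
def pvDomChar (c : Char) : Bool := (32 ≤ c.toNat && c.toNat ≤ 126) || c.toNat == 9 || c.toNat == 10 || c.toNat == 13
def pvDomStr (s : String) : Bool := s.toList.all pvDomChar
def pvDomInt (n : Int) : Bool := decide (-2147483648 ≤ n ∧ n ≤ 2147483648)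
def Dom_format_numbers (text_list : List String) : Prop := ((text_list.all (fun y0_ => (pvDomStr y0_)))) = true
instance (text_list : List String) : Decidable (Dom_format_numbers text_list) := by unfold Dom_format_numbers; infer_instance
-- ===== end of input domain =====

-- B formats by collecting the digits first and then slicing them into fixed 3/3/rest groups, and joins the
-- parts with a slicing str.join, instead of A's char-by-char accumulator with length-triggered dash
-- insertion and A's enumerate/index-based concatenation (objective: simpler).

-- ===== PORT A =====
-- standardize_numbers: loop over chars, append a dash when the accumulator's length is 3 or 7
def pvStdA (s : List Char) : List Char :=
  s.foldl (fun acc c =>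
    if c ∈ "0123456789".toList then
      (if acc.length = 3 ∨ acc.length = 7 then acc ++ ['-'] else acc) ++ [c]
    else acc) []

def format_numbers (text_list : List String) : String :=
  let fl : List (List Char) := text_list.map (fun s => pvStdA s.toList)
  let num : Int := (fl.length : Int) - 1
  String.ofList ((PySem.List.enumerate fl 0).foldl (fun acc p =>
    if p.1 = 0 then acc ++ p.2
    else if num = p.1 then acc ++ (" or ".toList ++ p.2)
    else acc ++ (", ".toList ++ p.2)) [])

-- ===== PORT B =====
-- digits[:3], digits[3:6], digits[6:] have nonnegative bounds, so they are exactly List.take/List.drop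
def pvFmtB (d : List Char) : List Char :=
  if d.length ≤ 3 then d
  else if d.length ≤ 6 then d.take 3 ++ '-' :: d.drop 3
  else d.take 3 ++ '-' :: ((d.drop 3).take 3 ++ '-' :: d.drop 6)

def pvStdB (s : List Char) : List Char :=
  pvFmtB (s.filter (· ∈ "0123456789".toList))

-- ', '.join(parts[:-1]) is PySem.Chars.join on dropLast; parts[-1] on a nonempty list is getLastD
def format_numbers_alt (text_list : List String) : String :=
  let parts : List (List Char) := text_list.map (fun s => pvStdB s.toList)
  match parts with
  | [] => ""
  | [x] => String.ofList x
  | x :: y :: rest =>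
      String.ofList (PySem.Chars.join ", ".toList ((x :: y :: rest).dropLast)
                 ++ (" or ".toList ++ (x :: y :: rest).getLastD []))

-- ===== PRECONDITION & SPEC =====
def Spec_format_numbers (text_list : List String) (out : String) : Prop := out = format_numbers_alt text_list
instance (text_list : List String) (out : String) : Decidable (Spec_format_numbers text_list out) := by unfold Spec_format_numbers; infer_instance

-- ===== CLAIM (what is proved, stated in full; the proofs are below) =====
def Claim_equal_format_numbers : Prop := ∀ (text_list : List String), Dom_format_numbers text_list → Spec_format_numbers text_list (format_numbers text_list)

-- ===== LEMMAS AND PROOFS =====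

-- appending one digit to the collected digits inserts a dash exactly when A's accumulator has length 3 or 7
theorem pvFmtB_step (d : List Char) (c : Char) :
    pvFmtB (d ++ [c]) =
      (if (pvFmtB d).length = 3 ∨ (pvFmtB d).length = 7 then pvFmtB d ++ ['-'] else pvFmtB d) ++ [c] := by
  by_cases h1 : d.length ≤ 2
  · have hd : pvFmtB d = d := by unfold pvFmtB; rw [if_pos (by omega)]
    rw [hd, if_neg (by omega)]
    unfold pvFmtB
    rw [if_pos (by simp; omega)]
  · by_cases h2 : d.length = 3
    · have hd : pvFmtB d = d := by unfold pvFmtB; rw [if_pos (by omega)]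
      rw [hd, if_pos (by omega)]
      unfold pvFmtB
      rw [if_neg (by simp; omega), if_pos (by simp; omega)]
      have e1 : 3 - d.length = 0 := by omega
      have t2 : List.take 3 d = d := List.take_of_length_le (by omega)
      have t3 : List.drop 3 d = [] := List.drop_of_length_le (by omega)
      simp [List.take_append, List.drop_append, e1, t2, t3]
    · by_cases h3 : d.length ≤ 5
      · have hd : pvFmtB d = d.take 3 ++ '-' :: d.drop 3 := by
          unfold pvFmtB; rw [if_neg (by omega), if_pos (by omega)]
        rw [hd, if_neg (by simp; omega)]
        unfold pvFmtB
        rw [if_neg (by simp; omega), if_pos (by simp; omega)]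
        have e1 : 3 - d.length = 0 := by omega
        simp [List.take_append, List.drop_append, e1]
      · by_cases h4 : d.length = 6
        · have hd : pvFmtB d = d.take 3 ++ '-' :: d.drop 3 := by
            unfold pvFmtB; rw [if_neg (by omega), if_pos (by omega)]
          rw [hd, if_pos (by simp; omega)]
          unfold pvFmtB
          rw [if_neg (by simp; omega), if_neg (by simp; omega)]
          have e1 : 3 - d.length = 0 := by omega
          have e2 : 6 - d.length = 0 := by omega
          have e3 : 3 - (d.length - 3) = 0 := by omega
          have t2 : List.take 3 (List.drop 3 d) = List.drop 3 d :=
            List.take_of_length_le (by simp; omega)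
          have t3 : List.drop 6 d = [] := List.drop_of_length_le (by omega)
          simp [List.take_append, List.drop_append, e1, e2, e3, t2, t3]
        · have hd : pvFmtB d = d.take 3 ++ '-' :: ((d.drop 3).take 3 ++ '-' :: d.drop 6) := by
            unfold pvFmtB; rw [if_neg (by omega), if_neg (by omega)]
          rw [hd, if_neg (by simp; omega)]
          unfold pvFmtB
          rw [if_neg (by simp; omega), if_neg (by simp; omega)]
          have e1 : 3 - d.length = 0 := by omega
          have e2 : 6 - d.length = 0 := by omega
          have t2 : List.take 3 (List.drop 3 d ++ [c]) = List.take 3 (List.drop 3 d) := by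
            rw [List.take_append_of_le_length (by simp; omega)]
          simp [List.take_append, List.drop_append, e1, e2, t2]

-- A's inner loop builds exactly B's collect-then-slice result
theorem pvStdA_eq_pvStdB (s : List Char) : pvStdA s = pvStdB s := by
  unfold pvStdB
  induction s using List.reverseRecOn with
  | nil => simp [pvStdA, pvFmtB]
  | append_singleton l c ih =>
    rw [List.filter_append]
    by_cases hc : c ∈ "0123456789".toList
    · simp only [pvStdA, List.foldl_append] at *
      rw [ih]
      have h2 : List.filter (fun x => decide (x ∈ "0123456789".toList)) [c] = [c] := by
        simp; simpa using hc
      rw [h2]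
      simp only [List.foldl_cons, List.foldl_nil]
      rw [if_pos hc]
      exact (pvFmtB_step _ c).symm
    · simp only [pvStdA, List.foldl_append] at *
      rw [ih]
      have h2 : List.filter (fun x => decide (x ∈ "0123456789".toList)) [c] = [] := by
        simp; simpa using hc
      rw [h2, List.append_nil]
      simp only [List.foldl_cons, List.foldl_nil]
      rw [if_neg hc]

-- recursive description of the join of the elements at indices ≥ 1
def pvJoinRest : List (List Char) → List Char
  | [] => []
  | [y] => " or ".toList ++ y
  | y :: z :: ys => ", ".toList ++ y ++ pvJoinRest (z :: ys)

theorem pvFoldA_tail (xs : List (List Char)) : ∀ (num k : Int) (acc : List Char),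
    1 ≤ k → num = k + xs.length - 1 →
    (PySem.List.enumerate xs k).foldl (fun acc p =>
      if p.1 = 0 then acc ++ p.2
      else if num = p.1 then acc ++ (" or ".toList ++ p.2)
      else acc ++ (", ".toList ++ p.2)) acc
    = acc ++ pvJoinRest xs := by
  induction xs with
  | nil => intro num k acc hk hnum; simp [PySem.List.enumerate_nil, pvJoinRest]
  | cons y ys ih =>
    intro num k acc hk hnum
    rw [PySem.List.enumerate_cons, List.foldl_cons]
    cases ys with
    | nil =>
      have h0 : ¬ (k = 0) := by omega
      have h1 : num = k := by simp at hnum; omega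
      rw [PySem.List.enumerate_nil]
      simp [h0, h1, pvJoinRest]
    | cons z zs =>
      have h0 : ¬ (k = 0) := by omega
      have h1 : ¬ (num = k) := by simp at hnum; omega
      rw [if_neg h0, if_neg h1]
      rw [ih num (k + 1) _ (by omega) (by simp at hnum ⊢; omega)]
      simp [pvJoinRest]

theorem pvJoinB (x : List Char) (xs : List (List Char)) (h : xs ≠ []) :
    x ++ pvJoinRest xs =
      PySem.Chars.join ", ".toList ((x :: xs).dropLast) ++ (" or ".toList ++ (x :: xs).getLastD []) := by
  induction xs generalizing x with
  | nil => exact absurd rfl h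
  | cons y ys ih =>
    cases ys with
    | nil =>
      simp [pvJoinRest, PySem.Chars.join_singleton]
    | cons z zs =>
      have hih := ih y (by simp)
      have hd : (x :: y :: z :: zs : List (List Char)).dropLast = x :: y :: (z :: zs).dropLast := by
        simp
      have hg : (x :: y :: z :: zs : List (List Char)).getLastD [] = (y :: z :: zs : List (List Char)).getLastD [] := by
        simp
      rw [hd, PySem.Chars.join_cons_cons, hg]
      have hdd : (y :: z :: zs : List (List Char)).dropLast = y :: (z :: zs).dropLast := by
        simp
      rw [← hdd]
      simp only [pvJoinRest, List.append_assoc]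
      rw [hih]

-- ===== VERDICT (by name: the statement is the Claim_ definition above) =====
theorem format_numbers_spec : Claim_equal_format_numbers := by
  intro tl _
  unfold Spec_format_numbers
  cases tl with
  | nil => rfl
  | cons a as =>
    cases as with
    | nil =>
      simp only [format_numbers, format_numbers_alt, List.map_cons, List.map_nil,
        PySem.List.enumerate_cons, PySem.List.enumerate_nil, List.foldl_cons, List.foldl_nil,
        List.nil_append]
      rw [pvStdA_eq_pvStdB]
      simp
    | cons b bs =>
      simp only [format_numbers, format_numbers_alt]
      rw [List.map_cons, List.map_cons, PySem.List.enumerate_cons, List.foldl_cons,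
          pvFoldA_tail (pvStdA b.toList :: List.map (fun s => pvStdA s.toList) bs)
            (((pvStdA a.toList :: pvStdA b.toList :: List.map (fun s => pvStdA s.toList) bs).length : Int) - 1)
            (0 + 1) _ (by omega) (by simp)]
      dsimp only
      rw [if_pos rfl, List.nil_append]
      rw [pvJoinB _ _ (by simp)]
      simp only [pvStdA_eq_pvStdB, List.map_cons]
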